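-- pv_equiv track=rewrite | github.com/hollowc2/polymarket_auto_trader | src/strategies/streak.py | detect_streak
-- ===== SOURCE A (Python) =====
-- def detect_streak(outcomes: list[str]) -> tuple[int, str]:
--     """
--     Detect the current streak at the end of the outcomes list.
--     Returns (streak_length, streak_direction).
--     """
--     if not outcomes:
--         return 0, ""
--
--     current = outcomes[-1]
--     streak = 1
--
--     for i in range(len(outcomes) - 2, -1, -1):
--         if outcomes[i] == current:
--             streak += 1
--         else:
--             break
--
--     return streak, current
-- ===== SOURCE B (Python) =====
-- def detect_streak(outcomes: list[str]) -> tuple[int, str]: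
--     # Forward one-pass fold: keep (run_length, run_value) of the current run;
--     # a mismatch restarts the run.  No backward scan, no early break.
--     streak, current = 0, ""
--     for x in outcomes:
--         if x == current:
--             streak += 1
--         else:
--             streak, current = 1, x
--     return streak, current
-- ===== Notes on version B (the rewrite author's own statement) =====
-- stated objective: idiomatic
-- what changed: Replaces the backward scan with early break by a single forward fold that maintains the current run's (length, value), restarting on mismatch; the empty-list case falls out of the (0, "") initial state.
import Mathlib
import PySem

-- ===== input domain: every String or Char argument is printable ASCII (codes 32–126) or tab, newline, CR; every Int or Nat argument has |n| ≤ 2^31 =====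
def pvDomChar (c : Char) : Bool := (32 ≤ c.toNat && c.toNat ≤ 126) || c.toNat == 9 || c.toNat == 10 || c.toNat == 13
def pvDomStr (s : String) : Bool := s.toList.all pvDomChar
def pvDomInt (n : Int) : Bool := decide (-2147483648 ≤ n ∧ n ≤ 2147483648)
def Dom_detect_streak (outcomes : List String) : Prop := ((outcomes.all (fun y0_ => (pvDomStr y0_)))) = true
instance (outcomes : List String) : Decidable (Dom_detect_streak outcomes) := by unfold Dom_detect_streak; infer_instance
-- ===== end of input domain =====

-- B replaces A's backward early-break scan by a forward fold over the whole list; return values proved equal.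
-- ===== PORT A =====
-- loop 'for i in range(len-2,-1,-1): if outcomes[i]==current: streak+=1 else: break',
-- transcribed over the reversed prefix (the elements at i = len-2 … 0 in that order)
def loopA : List String → String → Int → Int
  | [], _, streak => streak
  | x :: xs, current, streak =>
      if x = current then loopA xs current (streak + 1) else streak

def detect_streak (outcomes : List String) : Int × String :=
  if outcomes = [] then (0, "")
  else
    -- outcomes[-1] on a nonempty list is its last element
    let current := outcomes.getLast?.getD ""
    let streak := loopA outcomes.dropLast.reverse current 1
    (streak, current)

-- ===== PORT B =====
def stepB (st : Int × String) (x : String) : Int × String :=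
  if x = st.2 then (st.1 + 1, st.2) else (1, x)

def detect_streak_alt (outcomes : List String) : Int × String :=
  outcomes.foldl stepB (0, "")

-- ===== PRECONDITION & SPEC =====
def Spec_detect_streak (outcomes : List String) (out : Int × String) : Prop := out = detect_streak_alt outcomes
instance (outcomes : List String) (out : Int × String) : Decidable (Spec_detect_streak outcomes out) := by unfold Spec_detect_streak; infer_instance

-- ===== CLAIM (what is proved, stated in full; the proofs are below) =====
def Claim_equal_detect_streak : Prop := ∀ (outcomes : List String), Dom_detect_streak outcomes → Spec_detect_streak outcomes (detect_streak outcomes)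

-- ===== LEMMAS AND PROOFS =====
theorem loopA_acc (xs : List String) (c : String) (s : Int) :
    loopA xs c s = loopA xs c 0 + s := by
  induction xs generalizing s with
  | nil => simp [loopA]
  | cons x xs ih =>
      simp only [loopA]
      split_ifs with h
      · rw [ih (s + 1), ih (0 + 1)]; ring
      · ring

-- A's result on a nonempty list, phrased through its reverse
theorem A_char (rest : List String) (c : String) :
    detect_streak ((c :: rest).reverse) = (loopA rest c 1, c) := by
  simp [detect_streak]

theorem aux (r : List String) :
    detect_streak_alt r.reverse = detect_streak r.reverse := by
  induction r with
  | nil => simp [detect_streak, detect_streak_alt]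
  | cons c rest ih =>
      have hfold : detect_streak_alt (c :: rest).reverse = stepB (detect_streak_alt rest.reverse) c := by
        simp [detect_streak_alt]
      rw [hfold, ih, A_char]
      cases rest with
      | nil =>
          simp only [detect_streak, List.reverse_nil, stepB, loopA]
          by_cases hc : c = "" <;> simp [hc]
      | cons d rest2 =>
          rw [A_char]
          simp only [stepB, loopA]
          by_cases hcd : c = d
          · subst hcd
            rw [loopA_acc rest2 c (1 + 1), loopA_acc rest2 c 1]
            simp
            ring
          · simp [hcd, Ne.symm hcd]

theorem alt_eq (outcomes : List String) :
    detect_streak_alt outcomes = detect_streak outcomes := by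
  rw [← outcomes.reverse_reverse]
  exact aux outcomes.reverse

-- ===== VERDICT (by name: the statement is the Claim_ definition above) =====
theorem detect_streak_spec : Claim_equal_detect_streak := by
  intro outcomes _
  unfold Spec_detect_streak
  exact (alt_eq outcomes).symm
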